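-- pv_equiv track=rewrite | github.com/Arsen1302/Code-copy-detector | TestData/solutions/problem_1232_5.py | solution_1232_5
-- ===== SOURCE A (Python) =====
-- def solution_1232_5(sentence1: str, sentence2: str) -> bool:
--     sentence1, sentence2 = sentence1.split(), sentence2.split()
--     if len(sentence2) > len(sentence1):
--         sentence1, sentence2 = sentence2, sentence1
--     for p in range(len(sentence2)):
--         if sentence1[p] != sentence2[p]:
--             return sentence1[-(len(sentence2) - p):] == sentence2[p:]
--     return True
-- ===== SOURCE B (Python) =====
-- def _common(xs, ys):
--     k = 0
--     for a, b in zip(xs, ys):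
--         if a != b:
--             break
--         k += 1
--     return k
--
--
-- def solution_1232_5(sentence1: str, sentence2: str) -> bool:
--     w1, w2 = sentence1.split(), sentence2.split()
--     m = min(len(w1), len(w2))
--     return _common(w1, w2) + _common(w1[::-1], w2[::-1]) >= m
-- ===== Notes on version B (the rewrite author's own statement) =====
-- stated objective: alternative
-- what changed: Replaces A's length-ordered swap plus single indexed forward scan with an early-return negative-slice comparison by two symmetric passes: count the common word prefix and the common word suffix (prefix of the reversed lists) and test prefix+suffix >= min length.
import Mathlib
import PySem

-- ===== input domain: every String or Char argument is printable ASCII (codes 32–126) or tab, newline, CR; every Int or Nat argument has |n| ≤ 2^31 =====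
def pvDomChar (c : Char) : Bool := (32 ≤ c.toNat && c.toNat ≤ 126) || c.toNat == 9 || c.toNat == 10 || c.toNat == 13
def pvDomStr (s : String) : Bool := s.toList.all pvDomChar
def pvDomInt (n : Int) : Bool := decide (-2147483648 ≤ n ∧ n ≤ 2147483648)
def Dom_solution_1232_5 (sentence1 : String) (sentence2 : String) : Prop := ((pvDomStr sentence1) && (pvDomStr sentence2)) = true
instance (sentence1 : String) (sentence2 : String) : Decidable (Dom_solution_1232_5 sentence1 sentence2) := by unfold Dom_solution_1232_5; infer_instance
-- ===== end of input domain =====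

-- B replaces A's single indexed scan-plus-negative-slice by two symmetric common-prefix/suffix counts; alternative decomposition, same cost.

-- ===== PORT A =====
-- loop 'for p in range(len(sentence2))' of A, with the early return on mismatch
def pvLoopA (s1 s2 : List String) (p : Nat) : Bool :=
  if _h : p < s2.length then
    if s1.getD p "" ≠ s2.getD p "" then
      PySem.List.slice s1 (some (-((s2.length - p : Nat) : Int))) none == PySem.List.slice s2 (some (p : Int)) none
    else pvLoopA s1 s2 (p + 1)
  else true
termination_by s2.length - p

def solution_1232_5 (sentence1 : String) (sentence2 : String) : Bool :=
  let s1 := PySem.Str.split₀ sentence1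
  let s2 := PySem.Str.split₀ sentence2
  let sw := if s2.length > s1.length then (s2, s1) else (s1, s2)
  pvLoopA sw.1 sw.2 0

-- ===== PORT B =====
-- _common of Source B: length of the common prefix of two lists
def pvCommon : List String → List String → Nat
  | a :: xs, b :: ys => if a = b then pvCommon xs ys + 1 else 0
  | _, _ => 0

def solution_1232_5_alt (sentence1 : String) (sentence2 : String) : Bool :=
  let w1 := PySem.Str.split₀ sentence1
  let w2 := PySem.Str.split₀ sentence2
  let m := min w1.length w2.length
  decide (m ≤ pvCommon w1 w2 + pvCommon w1.reverse w2.reverse)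

-- ===== PRECONDITION & SPEC =====
def Spec_solution_1232_5 (sentence1 : String) (sentence2 : String) (out : Bool) : Prop := out = solution_1232_5_alt sentence1 sentence2
instance (sentence1 : String) (sentence2 : String) (out : Bool) : Decidable (Spec_solution_1232_5 sentence1 sentence2 out) := by unfold Spec_solution_1232_5; infer_instance

-- ===== CLAIM (what is proved, stated in full; the proofs are below) =====
def Claim_equal_solution_1232_5 : Prop := ∀ (sentence1 : String) (sentence2 : String), Dom_solution_1232_5 sentence1 sentence2 → Spec_solution_1232_5 sentence1 sentence2 (solution_1232_5 sentence1 sentence2)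

-- ===== LEMMAS AND PROOFS =====

-- ===== VERDICT (by name: the statement is the Claim_ definition above) =====
theorem pvCommon_le (xs ys : List String) : pvCommon xs ys ≤ min xs.length ys.length := by
  induction xs generalizing ys with
  | nil => simp [pvCommon]
  | cons a xs ih =>
    cases ys with
    | nil => simp [pvCommon]
    | cons b ys =>
      simp only [pvCommon, List.length_cons]
      split
      · have := ih ys; omega
      · omega

theorem pvCommon_comm (xs ys : List String) : pvCommon xs ys = pvCommon ys xs := by
  induction xs generalizing ys with
  | nil => cases ys <;> simp [pvCommon]
  | cons a xs ih =>
    cases ys with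
    | nil => simp [pvCommon]
    | cons b ys =>
      simp only [pvCommon]
      by_cases h : a = b
      · rw [if_pos h, if_pos h.symm, ih]
      · rw [if_neg h, if_neg (fun hh => h hh.symm)]

theorem pvCommon_get (xs ys : List String) (q : Nat) (hq : q < pvCommon xs ys) :
    xs.getD q "" = ys.getD q "" := by
  induction xs generalizing ys q with
  | nil => simp [pvCommon] at hq
  | cons a xs ih =>
    cases ys with
    | nil => simp [pvCommon] at hq
    | cons b ys =>
      simp only [pvCommon] at hq
      split at hq
      · cases q with
        | zero => simpa [List.getD_cons_zero] using ‹a = b›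
        | succ q => simpa [List.getD_cons_succ] using ih ys q (by omega)
      · omega

theorem pvCommon_mismatch (xs ys : List String)
    (h : pvCommon xs ys < min xs.length ys.length) :
    xs.getD (pvCommon xs ys) "" ≠ ys.getD (pvCommon xs ys) "" := by
  induction xs generalizing ys with
  | nil => simp at h
  | cons a xs ih =>
    cases ys with
    | nil => simp at h
    | cons b ys =>
      by_cases hab : a = b
      · have h' : pvCommon xs ys < min xs.length ys.length := by
          simp only [pvCommon, if_pos hab, List.length_cons] at h
          omega
        simpa [pvCommon, if_pos hab, List.getD_cons_succ] using ih ys h'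
      · simpa [pvCommon, if_neg hab, List.getD_cons_zero] using hab

theorem pvCommon_take_iff (xs ys : List String) (k : Nat)
    (hk : k ≤ min xs.length ys.length) :
    xs.take k = ys.take k ↔ k ≤ pvCommon xs ys := by
  induction xs generalizing ys k with
  | nil => simp at hk; simp [hk]
  | cons a xs ih =>
    cases ys with
    | nil => simp at hk; simp [hk]
    | cons b ys =>
      cases k with
      | zero => simp
      | succ k =>
        simp only [List.length_cons] at hk
        simp only [List.take_succ_cons, List.cons.injEq, pvCommon]
        by_cases hab : a = b
        · rw [if_pos hab, ih ys k (by omega)]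
          constructor
          · rintro ⟨_, h2⟩; omega
          · intro h; exact ⟨hab, by omega⟩
        · rw [if_neg hab]
          constructor
          · rintro ⟨h1, _⟩; exact absurd h1 hab
          · omega

theorem pvDrop_eq_iff (l1 l2 : List String) (k : Nat)
    (hk1 : k ≤ l1.length) (hk2 : k ≤ l2.length) :
    (l1.drop (l1.length - k) = l2.drop (l2.length - k)) ↔
      k ≤ pvCommon l1.reverse l2.reverse := by
  rw [← pvCommon_take_iff _ _ k (by simp; omega)]
  have e1 : (l1.drop (l1.length - k)).reverse = l1.reverse.take k := by
    rw [List.reverse_drop]; congr 1; omega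
  have e2 : (l2.drop (l2.length - k)).reverse = l2.reverse.take k := by
    rw [List.reverse_drop]; congr 1; omega
  constructor
  · intro h
    have := congrArg List.reverse h
    rwa [e1, e2] at this
  · intro h
    apply List.reverse_injective
    rw [e1, e2, h]

theorem pvLoopA_eq (l1 l2 : List String) (hlen : l2.length ≤ l1.length)
    (p : Nat) (hp : p ≤ pvCommon l1 l2) :
    pvLoopA l1 l2 p =
      decide (l2.length ≤ pvCommon l1 l2 + pvCommon l1.reverse l2.reverse) := by
  have hc := pvCommon_le l1 l2
  rw [pvLoopA]
  split
  · rename_i hplt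
    by_cases heq : l1.getD p "" = l2.getD p ""
    · rw [if_neg (by simpa using heq)]
      have hpc : p < pvCommon l1 l2 := by
        rcases Nat.lt_or_ge p (pvCommon l1 l2) with h | h
        · exact h
        · exfalso
          have hpe : p = pvCommon l1 l2 := by omega
          exact pvCommon_mismatch l1 l2 (by omega) (hpe ▸ heq)
      exact pvLoopA_eq l1 l2 hlen (p + 1) (by omega)
    · rw [if_pos (by simpa using heq)]
      have hcp : pvCommon l1 l2 = p := by
        rcases Nat.lt_or_ge p (pvCommon l1 l2) with h | h
        · exact absurd (pvCommon_get l1 l2 p h) heq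
        · omega
      have hk : 0 < l2.length - p := by omega
      rw [PySem.List.slice_from_neg_natCast _ _ hk, PySem.List.slice_from_natCast]
      have h2 : l2.drop p = l2.drop (l2.length - (l2.length - p)) := by
        congr 1; omega
      rw [h2]
      rw [Bool.beq_eq_decide_eq, decide_eq_decide,
        pvDrop_eq_iff l1 l2 (l2.length - p) (by omega) (by omega)]
      omega
  · rename_i hnlt
    have : pvCommon l1 l2 = l2.length := by omega
    simp [this]
termination_by l2.length - p

theorem solution_1232_5_spec : Claim_equal_solution_1232_5 := by
  intro s1 s2 _
  unfold Spec_solution_1232_5 solution_1232_5 solution_1232_5_alt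
  simp only []
  set w1 := PySem.Str.split₀ s1 with hw1
  set w2 := PySem.Str.split₀ s2 with hw2
  by_cases h : w2.length > w1.length
  · rw [if_pos h]
    rw [pvLoopA_eq w2 w1 (by omega) 0 (by omega)]
    rw [pvCommon_comm w2 w1, pvCommon_comm w2.reverse w1.reverse, decide_eq_decide]
    omega
  · rw [if_neg h]
    rw [pvLoopA_eq w1 w2 (by omega) 0 (by omega), decide_eq_decide]
    omega
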